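-- pv_equiv track=rewrite | github.com/JngHyun/Algorithm | 프로그래머스/고득점키트/스택큐_기능개발.py | solution
-- ===== SOURCE A (Python) =====
-- def solution(progresses, speeds):
--     stack = []
--     answer = []
--     for p,s in zip(progresses,speeds):
--         if (100-p)%s == 0:
--             time = int(((100-p)/s))
--         else:
--             time = int(((100-p)//s+1))
--
--         if len(stack)==0:
--             stack.append(time)
--
--         elif stack[0] < time:
--             answer.append([stack[0],len(stack)])
--             stack = [time]
--
--         else:
--             stack.append(time)
--
--     answer.append([stack[0],len(stack)])
--     answer.sort()
--
--     answer = [a[1] for a in answer]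
--
--     return answer
-- ===== SOURCE B (Python) =====
-- def solution(progresses, speeds):
--     # days until each feature is done (ceiling division)
--     days = [-(-(100 - p) // s) for p, s in zip(progresses, speeds)]
--     # prefix maximum = the day the feature in front of each one deploys
--     lead = []
--     m = days[0]
--     for d in days:
--         if d > m:
--             m = d
--         lead.append(m)
--     # run-length encode the deploy days: each run is one release batch
--     counts = []
--     prev = None
--     for v in lead:
--         if v == prev:
--             counts[-1] += 1
--         else:
--             counts.append(1)
--             prev = v
--     return counts
-- ===== Notes on version B (the rewrite author's own statement) =====
-- stated objective: alternative
-- what changed: Replaces A's blocking stack with flush-on-larger plus a final sort and projection by three independent passes: a ceiling-division days list, its prefix-maximum sequence (the day each feature actually deploys), and a run-length encoding of that sequence; no stack and no sort.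
import Mathlib
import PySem

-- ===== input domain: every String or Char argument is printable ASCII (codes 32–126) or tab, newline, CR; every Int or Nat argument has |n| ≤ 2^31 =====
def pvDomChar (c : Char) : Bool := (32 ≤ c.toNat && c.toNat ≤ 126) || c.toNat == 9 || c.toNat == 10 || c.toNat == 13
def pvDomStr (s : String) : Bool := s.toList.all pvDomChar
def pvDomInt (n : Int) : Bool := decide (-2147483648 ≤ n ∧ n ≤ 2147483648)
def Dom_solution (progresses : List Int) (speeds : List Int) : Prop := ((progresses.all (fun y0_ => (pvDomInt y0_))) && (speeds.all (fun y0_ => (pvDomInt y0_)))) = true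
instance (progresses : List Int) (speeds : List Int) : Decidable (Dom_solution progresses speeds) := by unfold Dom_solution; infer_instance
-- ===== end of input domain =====

-- B replaces the stack+flush+sort pipeline with days / prefix-maximum / run-length-encoding passes (alternative decomposition, same cost).

-- ===== PORT A =====
-- time = ceil((100-p)/s); the divisible branch int((100-p)/s) is exact as floordiv on Dom
-- (the quotient is an integer of magnitude < 2^53, so Python's float division returns it exactly).
def pvTimeA (p : Int) (s : Int) : Int :=
  if PySem.Int.mod (100 - p) s == 0 then PySem.Int.floordiv (100 - p) s
  else PySem.Int.floordiv (100 - p) s + 1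

def pvStepA (st : List Int × List (Int × Int)) (ps : Int × Int) : List Int × List (Int × Int) :=
  let time := pvTimeA ps.1 ps.2
  match st with
  | ([], ans) => ([time], ans)
  | (h :: t, ans) =>
      if h < time then ([time], ans ++ [(h, ((h :: t).length : Int))])
      else ((h :: t) ++ [time], ans)

def solution (progresses : List Int) (speeds : List Int) : List Int :=
  let fin := (progresses.zip speeds).foldl pvStepA ([], [])
  match fin with
  | ([], _) => []  -- Python raises IndexError on stack[0] here (empty zip); excluded by Pre_
  | (h :: t, ans) =>
      (PySem.List.sorted2 (ans ++ [(h, ((h :: t).length : Int))]) Prod.fst Prod.snd).map Prod.snd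

-- ===== PORT B =====
def pvCeilB (ps : Int × Int) : Int := -(PySem.Int.floordiv (-(100 - ps.1)) ps.2)

def pvLeadStep (acc : Int × List Int) (d : Int) : Int × List Int :=
  let m := if d > acc.1 then d else acc.1
  (m, acc.2 ++ [m])

def pvCountStep (acc : Option Int × List Int) (v : Int) : Option Int × List Int :=
  if some v == acc.1 then (acc.1, acc.2.dropLast ++ [(acc.2.getLast?.getD 0) + 1])
  else (some v, acc.2 ++ [1])

def solution_alt (progresses : List Int) (speeds : List Int) : List Int :=
  let days := (progresses.zip speeds).map pvCeilB
  match days with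
  | [] => []  -- Python raises IndexError on days[0] here; excluded by Pre_
  | d0 :: _ =>
      let lead := (days.foldl pvLeadStep (d0, [])).2
      (lead.foldl pvCountStep ((none : Option Int), [])).2

-- ===== PRECONDITION & SPEC =====
-- Pre_ excludes exactly the inputs where the Python A raises: an empty list (IndexError on
-- stack[0]/days[0]) or a zero speed among the zipped pairs (ZeroDivisionError); B raises there too.
def Pre_solution (progresses : List Int) (speeds : List Int) : Prop :=
  progresses ≠ [] ∧ speeds ≠ [] ∧ ∀ x ∈ progresses.zip speeds, x.2 ≠ 0

instance (progresses : List Int) (speeds : List Int) : Decidable (Pre_solution progresses speeds) := by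
  unfold Pre_solution; infer_instance

def pvWitness_solution : List Int × List Int := ([93, 30, 55], [1, 30, 5])

def Spec_solution (progresses : List Int) (speeds : List Int) (out : List Int) : Prop := out = solution_alt progresses speeds
instance (progresses : List Int) (speeds : List Int) (out : List Int) : Decidable (Spec_solution progresses speeds out) := by unfold Spec_solution; infer_instance

-- ===== CLAIM (what is proved, stated in full; the proofs are below) =====
def Claim_equal_solution : Prop := ∀ (progresses : List Int) (speeds : List Int), Dom_solution progresses speeds → Pre_solution progresses speeds → Spec_solution progresses speeds (solution progresses speeds)

-- ===== LEMMAS AND PROOFS =====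

-- (leader, batch size) pairs of the completed batches
def pvGroups (leader : Int) (cnt : Int) : List Int → List (Int × Int)
  | [] => [(leader, cnt)]
  | t :: ts => if leader < t then (leader, cnt) :: pvGroups t 1 ts else pvGroups leader (cnt + 1) ts

-- the batch sizes alone
def pvCnts (leader : Int) (cnt : Int) : List Int → List Int
  | [] => [cnt]
  | t :: ts => if leader < t then cnt :: pvCnts t 1 ts else pvCnts leader (cnt + 1) ts

-- prefix maxima starting from m
def pvLead (m : Int) : List Int → List Int
  | [] => []
  | d :: ds => (if d > m then d else m) :: pvLead (if d > m then d else m) ds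

def pvAssembleA (st : List Int × List (Int × Int)) : List (Int × Int) :=
  match st with
  | ([], ans) => ans
  | (h :: t, ans) => ans ++ [(h, ((h :: t).length : Int))]

lemma pvKey (s q r q' r' : Int)
    (hsum : q * s + r + (q' * s + r') = 0)
    (hb : (s < 0 ∧ s < r ∧ r ≤ 0 ∧ s < r' ∧ r' ≤ 0) ∨ (0 < s ∧ 0 ≤ r ∧ r < s ∧ 0 ≤ r' ∧ r' < s)) :
    (r = 0 → -q' = q) ∧ (r ≠ 0 → -q' = q + 1) := by
  have hk : (q + q') * s = -(r + r') := by ring_nf; linarith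
  have hcase : q + q' = 0 ∨ q + q' = -1 := by
    rcases hb with ⟨hs, h1, h2, h3, h4⟩ | ⟨hs, h1, h2, h3, h4⟩
    · have hu1 : 0 ≤ (q + q') * s := by linarith
      have hu2 : (q + q') * s < -2 * s := by linarith
      have hk1 : q + q' ≤ 0 := by
        by_contra hc
        have h5 : 1 ≤ q + q' := by omega
        have := mul_le_mul_of_nonpos_right h5 (le_of_lt hs)
        linarith
      have hk2 : -2 < q + q' := by
        by_contra hc
        have h5 : q + q' ≤ -2 := by omega
        have := mul_le_mul_of_nonpos_right h5 (le_of_lt hs)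
        linarith
      omega
    · have hu1 : -2 * s < (q + q') * s := by linarith
      have hu2 : (q + q') * s ≤ 0 := by linarith
      have hk1 : q + q' ≤ 0 := by
        by_contra hc
        have h5 : 1 ≤ q + q' := by omega
        have := mul_le_mul_of_nonneg_right h5 (le_of_lt hs)
        linarith
      have hk2 : -2 < q + q' := by
        by_contra hc
        have h5 : q + q' ≤ -2 := by omega
        have := mul_le_mul_of_nonneg_right h5 (le_of_lt hs)
        linarith
      omega
  constructor
  · intro hr0
    subst hr0
    have h0 : q + q' = 0 := by
      rcases hcase with h | h
      · exact h
      · exfalso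
        have : r' = s := by
          have : (q + q') * s = -s := by rw [h]; ring
          linarith [hk, this]
        rcases hb with ⟨hs, h1, h2, h3, h4⟩ | ⟨hs, h1, h2, h3, h4⟩ <;> omega
    omega
  · intro hr0
    have h0 : q + q' = -1 := by
      rcases hcase with h | h
      · exfalso
        have hrr : r + r' = 0 := by
          have : (q + q') * s = 0 := by rw [h]; ring
          linarith [hk, this]
        rcases hb with ⟨hs, h1, h2, h3, h4⟩ | ⟨hs, h1, h2, h3, h4⟩ <;> omega
      · exact h
    omega

-- A's two ceiling branches equal B's -(-(100-p)//s) for s ≠ 0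
lemma pvTimeA_eq_ceilB (p s : Int) (hs : s ≠ 0) : pvTimeA p s = pvCeilB (p, s) := by
  have hq := PySem.Int.floordiv_mul_add_mod (100 - p) s
  have hq' := PySem.Int.floordiv_mul_add_mod (-(100 - p)) s
  have hb : (s < 0 ∧ s < PySem.Int.mod (100 - p) s ∧ PySem.Int.mod (100 - p) s ≤ 0 ∧
        s < PySem.Int.mod (-(100 - p)) s ∧ PySem.Int.mod (-(100 - p)) s ≤ 0) ∨
      (0 < s ∧ 0 ≤ PySem.Int.mod (100 - p) s ∧ PySem.Int.mod (100 - p) s < s ∧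
        0 ≤ PySem.Int.mod (-(100 - p)) s ∧ PySem.Int.mod (-(100 - p)) s < s) := by
    rcases lt_or_gt_of_ne hs with hneg | hpos
    · exact Or.inl ⟨hneg, (PySem.Int.mod_neg_bounds (100 - p) hneg).1,
        (PySem.Int.mod_neg_bounds (100 - p) hneg).2,
        (PySem.Int.mod_neg_bounds (-(100 - p)) hneg).1,
        (PySem.Int.mod_neg_bounds (-(100 - p)) hneg).2⟩
    · exact Or.inr ⟨hpos, PySem.Int.mod_nonneg (100 - p) hpos, PySem.Int.mod_lt (100 - p) hpos,
        PySem.Int.mod_nonneg (-(100 - p)) hpos, PySem.Int.mod_lt (-(100 - p)) hpos⟩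
  have hkey := pvKey s (PySem.Int.floordiv (100 - p) s) (PySem.Int.mod (100 - p) s)
    (PySem.Int.floordiv (-(100 - p)) s) (PySem.Int.mod (-(100 - p)) s) (by linarith) hb
  unfold pvTimeA
  rw [show pvCeilB (p, s) = -(PySem.Int.floordiv (-(100 - p)) s) from rfl]
  by_cases hr0 : PySem.Int.mod (100 - p) s = 0
  · have := hkey.1 hr0
    rw [if_pos (by simp [hr0])]
    omega
  · have := hkey.2 hr0
    rw [if_neg (by simp [hr0])]
    omega

-- A's loop computes the (leader, size) pairs of pvGroups
lemma pvFoldA_eq_groups : ∀ (l : List (Int × Int)) (h : Int) (t : List Int) (ans : List (Int × Int)),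
    (∀ x ∈ l, x.2 ≠ 0) →
    pvAssembleA (l.foldl pvStepA (h :: t, ans)) = ans ++ pvGroups h ((t.length : Int) + 1) (l.map pvCeilB) := by
  intro l
  induction l with
  | nil =>
      intro h t ans _
      simp [pvAssembleA, pvGroups]
  | cons x l ih =>
      intro h t ans hnz
      have hx : pvTimeA x.1 x.2 = pvCeilB x := by
        have := pvTimeA_eq_ceilB x.1 x.2 (hnz x (by simp))
        simpa using this
      have hnz' : ∀ y ∈ l, y.2 ≠ 0 := fun y hy => hnz y (by simp [hy])
      simp only [List.foldl_cons, List.map_cons]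
      by_cases hlt : h < pvCeilB x
      · rw [show pvStepA (h :: t, ans) x = ([pvCeilB x], ans ++ [(h, ((h :: t).length : Int))]) by
          simp [pvStepA, hx, hlt]]
        rw [ih _ _ _ hnz']
        rw [show pvGroups h ((t.length : Int) + 1) (pvCeilB x :: l.map pvCeilB)
              = (h, ((t.length : Int) + 1)) :: pvGroups (pvCeilB x) 1 (l.map pvCeilB) by
          simp [pvGroups, hlt]]
        simp
      · rw [show pvStepA (h :: t, ans) x = (h :: (t ++ [pvCeilB x]), ans) by
          simp [pvStepA, hx, hlt]]
        rw [ih _ _ _ hnz']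
        rw [show pvGroups h ((t.length : Int) + 1) (pvCeilB x :: l.map pvCeilB)
              = pvGroups h ((t.length : Int) + 1 + 1) (l.map pvCeilB) by
          simp [pvGroups, hlt]]
        simp

lemma pvFoldA_stack_ne_nil : ∀ (l : List (Int × Int)) (st : List Int × List (Int × Int)),
    st.1 ≠ [] → (l.foldl pvStepA st).1 ≠ [] := by
  intro l
  induction l with
  | nil => intro st h; simpa using h
  | cons x l ih =>
      intro st h
      simp only [List.foldl_cons]
      apply ih
      obtain ⟨stack, ans⟩ := st
      match stack with
      | [] => exact absurd rfl h
      | a :: t =>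
          by_cases hlt : a < pvTimeA x.1 x.2 <;> simp [pvStepA, hlt]

-- every leader in pvGroups is ≥ the starting leader
lemma pvGroups_fst_le : ∀ (ds : List Int) (l c : Int), ∀ x ∈ pvGroups l c ds, l ≤ x.1 := by
  intro ds
  induction ds with
  | nil => intro l c x hx; simp [pvGroups] at hx; simp [hx]
  | cons d ds ih =>
      intro l c x hx
      by_cases hlt : l < d
      · simp [pvGroups, hlt] at hx
        rcases hx with h | h
        · simp [h]
        · exact le_of_lt (lt_of_lt_of_le hlt (ih d 1 x h))
      · simp [pvGroups, hlt] at hx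
        exact ih l (c + 1) x hx

lemma pvGroups_pairwise : ∀ (ds : List Int) (l c : Int),
    (pvGroups l c ds).Pairwise (fun a b => a.1 < b.1) := by
  intro ds
  induction ds with
  | nil => intro l c; simp [pvGroups]
  | cons d ds ih =>
      intro l c
      by_cases hlt : l < d
      · simp only [pvGroups, if_pos hlt]
        refine List.pairwise_cons.mpr ⟨?_, ih d 1⟩
        intro x hx
        exact lt_of_lt_of_le hlt (pvGroups_fst_le ds d 1 x hx)
      · simpa [pvGroups, if_neg hlt] using ih l (c + 1)

-- inserting into an ordered accumulator appends; hence the foldl-insert sort is a no-op on ordered input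
lemma pvFoldl_insertBy_eq_append {α : Type} (before : α → α → Bool) :
    ∀ (l acc : List α), (∀ x ∈ l, ∀ y ∈ acc, before x y = false) →
      l.Pairwise (fun a b => before b a = false) →
      l.foldl (fun acc x => PySem.List.insertBy before x acc) acc = acc ++ l := by
  intro l
  induction l with
  | nil => intro acc _ _; simp
  | cons x l ih =>
      intro acc hcross hpw
      simp only [List.foldl_cons]
      rw [PySem.List.insertBy_of_forall_not_before before x acc (fun y hy => hcross x (by simp) y hy)]
      rw [ih (acc ++ [x]) ?_ (List.pairwise_cons.mp hpw).2]
      · simp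
      · intro z hz y hy
        rcases List.mem_append.mp hy with hy | hy
        · exact hcross z (by simp [hz]) y hy
        · simp at hy
          subst hy
          exact (List.pairwise_cons.mp hpw).1 z hz

lemma pvSorted2_eq_self (l : List (Int × Int)) (h : l.Pairwise (fun a b => a.1 < b.1)) :
    PySem.List.sorted2 l Prod.fst Prod.snd = l := by
  unfold PySem.List.sorted2
  simp only [if_neg (by simp : ¬ (false = true))]
  have := pvFoldl_insertBy_eq_append
    (fun a b => decide (a.1 < b.1) || (!decide (b.1 < a.1) && decide (a.2 < b.2))) l []
    (by intro x _ y hy; simp at hy)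
    (by
      refine List.Pairwise.imp ?_ h
      intro a b hab
      simp only [Bool.or_eq_false_iff, Bool.and_eq_false_iff]
      constructor
      · simpa using not_lt_of_gt hab
      · left; simpa using hab)
  simpa using this

lemma pvMap_snd_groups : ∀ (ds : List Int) (l c : Int),
    (pvGroups l c ds).map Prod.snd = pvCnts l c ds := by
  intro ds
  induction ds with
  | nil => intro l c; simp [pvGroups, pvCnts]
  | cons d ds ih =>
      intro l c
      by_cases hlt : l < d <;> simp [pvGroups, pvCnts, hlt, ih]

-- B's first loop builds the prefix maxima
lemma pvFoldLead : ∀ (ds : List Int) (m : Int) (acc : List Int),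
    (ds.foldl pvLeadStep (m, acc)).2 = acc ++ pvLead m ds := by
  intro ds
  induction ds with
  | nil => intro m acc; simp [pvLead]
  | cons d ds ih =>
      intro m acc
      simp only [List.foldl_cons, pvLeadStep, pvLead]
      by_cases hd : d > m
      · simp only [if_pos hd]
        rw [ih d (acc ++ [d])]
        simp
      · simp only [if_neg hd]
        rw [ih m (acc ++ [m])]
        simp

-- B's second loop run-length-encodes the prefix maxima into pvCnts
lemma pvFoldCount : ∀ (ds : List Int) (m : Int) (cs : List Int) (c : Int),
    ((pvLead m ds).foldl pvCountStep (some m, cs ++ [c])).2 = cs ++ pvCnts m c ds := by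
  intro ds
  induction ds with
  | nil => intro m cs c; simp [pvLead, pvCnts]
  | cons d ds ih =>
      intro m cs c
      by_cases hd : d > m
      · have hne : ¬ (d = m) := by omega
        simp only [pvLead, if_pos hd, List.foldl_cons, pvCountStep]
        rw [if_neg (by simp [hne])]
        have := ih d (cs ++ [c]) 1
        rw [show (cs ++ [c]) ++ [1] = cs ++ [c] ++ [(1 : Int)] by simp] at this
        rw [this]
        simp [pvCnts, hd]
      · simp only [pvLead, if_neg hd, List.foldl_cons, pvCountStep]
        rw [if_pos (by simp)]
        rw [show ((cs ++ [c]).dropLast ++ [(cs ++ [c]).getLast?.getD 0 + 1]) = cs ++ [c + 1] by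
          simp]
        rw [ih m cs (c + 1)]
        have : ¬ (m < d) := by omega
        simp [pvCnts, this]

-- ===== VERDICT (by name: the statement is the Claim_ definition above) =====
theorem solution_spec : Claim_equal_solution := by
  intro progresses speeds _ hpre
  obtain ⟨hp, hs, hz⟩ := hpre
  unfold Spec_solution
  have hzip : progresses.zip speeds ≠ [] := by
    simp [List.zip_eq_nil_iff]
    exact ⟨hp, hs⟩
  obtain ⟨x0, rest, hx⟩ := List.exists_cons_of_ne_nil hzip
  -- A side
  have hnz : ∀ x ∈ progresses.zip speeds, x.2 ≠ 0 := hz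
  rw [hx] at hnz
  have hx0 : pvTimeA x0.1 x0.2 = pvCeilB x0 := by
    simpa using pvTimeA_eq_ceilB x0.1 x0.2 (hnz x0 (by simp))
  have hA : solution progresses speeds
      = pvCnts (pvCeilB x0) 1 (rest.map pvCeilB) := by
    unfold solution
    rw [hx]
    simp only [List.foldl_cons]
    rw [show pvStepA ([], []) x0 = ([pvCeilB x0], []) by simp [pvStepA, hx0]]
    have hfold := pvFoldA_eq_groups rest (pvCeilB x0) [] []
      (fun y hy => hnz y (by simp [hy]))
    have hne := pvFoldA_stack_ne_nil rest ([pvCeilB x0], []) (by simp)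
    rcases hfin : rest.foldl pvStepA ([pvCeilB x0], []) with ⟨stack, ans⟩
    rw [hfin] at hfold hne
    match stack with
    | [] => simp at hne
    | h :: t =>
        simp only []
        have hasm : pvAssembleA (h :: t, ans) = ans ++ [(h, ((h :: t).length : Int))] := rfl
        rw [hasm] at hfold
        simp only [List.length_nil, Nat.cast_zero, zero_add] at hfold
        rw [hfold, List.nil_append]
        rw [pvSorted2_eq_self _ (pvGroups_pairwise _ _ _)]
        rw [pvMap_snd_groups]
  -- B side
  have hB : solution_alt progresses speeds
      = pvCnts (pvCeilB x0) 1 (rest.map pvCeilB) := by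
    unfold solution_alt
    rw [hx]
    simp only [List.map_cons]
    have hlead : ((pvCeilB x0 :: rest.map pvCeilB).foldl pvLeadStep (pvCeilB x0, [])).2
        = pvCeilB x0 :: pvLead (pvCeilB x0) (rest.map pvCeilB) := by
      rw [pvFoldLead (pvCeilB x0 :: rest.map pvCeilB) (pvCeilB x0) []]
      simp [pvLead]
    rw [hlead]
    simp only [List.foldl_cons]
    rw [show pvCountStep ((none : Option Int), []) (pvCeilB x0) = (some (pvCeilB x0), [1]) by
      simp [pvCountStep]]
    have := pvFoldCount (rest.map pvCeilB) (pvCeilB x0) [] 1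
    simpa using this
  rw [hA, hB]
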